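-- pv_equiv track=rewrite | github.com/Nick19861111/aiSound | test/day_07.py | encode_command
-- ===== SOURCE A (Python) =====
-- def encode_command(cmd):
--     if not cmd or len(cmd) < 1:
--         return [0, 0, 0, 0]
--     verb = cmd[0]
--     noun = cmd[1:]
--     encoded = [ord(verb)]
--     for i in range(3):
--         if i < len(noun):
--             c = noun[i]
--             encoded.append(ord(c))
--         else:
--             encoded.append(0)
--     return encoded
-- ===== SOURCE B (Python) =====
-- def encode_command(cmd):
--     s = ((cmd or '') + '\0' * 4)[:4]
--     return [ord(c) for c in s]
-- ===== Notes on version B (the rewrite author's own statement) =====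
-- stated objective: simpler
-- what changed: Replaces the verb/noun split and the 3-iteration index-checked loop with a single NUL-padded 4-char string mapped uniformly through ord; the empty/None guard disappears because padding already yields [0,0,0,0].
import Mathlib
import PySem

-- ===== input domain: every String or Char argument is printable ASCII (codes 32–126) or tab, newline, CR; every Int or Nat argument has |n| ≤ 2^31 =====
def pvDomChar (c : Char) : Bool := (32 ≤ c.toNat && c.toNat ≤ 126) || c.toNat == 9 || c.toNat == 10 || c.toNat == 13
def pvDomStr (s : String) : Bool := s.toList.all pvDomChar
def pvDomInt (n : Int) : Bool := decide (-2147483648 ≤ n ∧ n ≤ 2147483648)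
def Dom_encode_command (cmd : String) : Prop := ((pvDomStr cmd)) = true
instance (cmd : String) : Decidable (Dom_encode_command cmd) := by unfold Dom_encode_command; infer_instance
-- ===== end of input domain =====

-- ===== PORT A =====
-- Header: B builds one NUL-padded 4-char string and maps ord uniformly (objective: simpler).
def encode_command (cmd : String) : List Int :=
  if cmd.toList = [] ∨ cmd.toList.length < 1 then [0, 0, 0, 0]
  else
    let verb := cmd.toList.headI          -- cmd[0], guarded nonempty
    let noun := cmd.toList.drop 1          -- cmd[1:]
    let encoded : List Int := [(verb.toNat : Int)]
    (List.range 3).foldl (fun enc i =>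
      if i < noun.length then enc ++ [((noun.getD i ' ').toNat : Int)]
      else enc ++ [0]) encoded

-- ===== PORT B =====
def encode_command_alt (cmd : String) : List Int :=
  ((cmd.toList ++ List.replicate 4 '\x00').take 4).map (fun c => (c.toNat : Int))

-- ===== PRECONDITION & SPEC =====
def Spec_encode_command (cmd : String) (out : List Int) : Prop := out = encode_command_alt cmd
instance (cmd : String) (out : List Int) : Decidable (Spec_encode_command cmd out) := by unfold Spec_encode_command; infer_instance

-- ===== CLAIM (what is proved, stated in full; the proofs are below) =====
def Claim_equal_encode_command : Prop := ∀ (cmd : String), Dom_encode_command cmd → Spec_encode_command cmd (encode_command cmd)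

-- ===== LEMMAS AND PROOFS =====

-- ===== VERDICT (by name: the statement is the Claim_ definition above) =====
theorem encode_command_spec : Claim_equal_encode_command := by
  intro cmd _
  unfold Spec_encode_command encode_command encode_command_alt
  rcases h : cmd.toList with _ | ⟨a, t⟩
  · simp
  · rcases t with _ | ⟨b, t⟩
    · simp [List.range_succ]
    · rcases t with _ | ⟨c, t⟩
      · simp [List.range_succ]
      · rcases t with _ | ⟨d, t⟩ <;> simp [List.range_succ]
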